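-- pv_equiv track=rewrite | github.com/jyjww/algorithm | 프로그래머스/0/120894. 영어가 싫어요/영어가 싫어요.py | solution
-- ===== SOURCE A (Python) =====
-- def solution(numbers):
--     dic = {
--         "zero": 0, "one": 1, "two": 2, "three": 3, "four": 4, "five": 5, "six": 6, "seven": 7, "eight": 8, "nine": 9
--     }
--     ans = ''
--     i = 0
--     while i < len(numbers):
--         if numbers[i:i+3] in dic:
--             ans += str(dic[numbers[i:i+3]])
--             i += 3
--         elif numbers[i:i+4] in dic:
--             ans += str(dic[numbers[i:i+4]])
--             i += 4
--         elif numbers[i:i+5] in dic: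
--             ans += str(dic[numbers[i:i+5]])
--             i += 5
--         else:
--             return 0
--     return int(ans)
-- ===== SOURCE B (Python) =====
-- def solution(numbers):
--     table = {
--         "ze": ("zero", "0"), "on": ("one", "1"), "tw": ("two", "2"),
--         "th": ("three", "3"), "fo": ("four", "4"), "fi": ("five", "5"),
--         "si": ("six", "6"), "se": ("seven", "7"), "ei": ("eight", "8"),
--         "ni": ("nine", "9"),
--     }
--     digits = []
--     i = 0
--     n = len(numbers)
--     while i < n:
--         entry = table.get(numbers[i:i+2])
--         if entry is None:
--             return 0
--         word, digit = entry
--         if numbers[i:i+len(word)] != word: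
--             return 0
--         digits.append(digit)
--         i += len(word)
--     return int(''.join(digits))
-- ===== Notes on version B (the rewrite author's own statement) =====
-- stated objective: alternative
-- what changed: A scans each position by testing the length-3, length-4 and length-5 slice against the word dict and concatenates digit characters; B dispatches on the unique two-character prefix via a prefix table mapping it to its (word, digit), verifies that single word in place, collects the digits in a list and joins them once at the end.
import Mathlib
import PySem

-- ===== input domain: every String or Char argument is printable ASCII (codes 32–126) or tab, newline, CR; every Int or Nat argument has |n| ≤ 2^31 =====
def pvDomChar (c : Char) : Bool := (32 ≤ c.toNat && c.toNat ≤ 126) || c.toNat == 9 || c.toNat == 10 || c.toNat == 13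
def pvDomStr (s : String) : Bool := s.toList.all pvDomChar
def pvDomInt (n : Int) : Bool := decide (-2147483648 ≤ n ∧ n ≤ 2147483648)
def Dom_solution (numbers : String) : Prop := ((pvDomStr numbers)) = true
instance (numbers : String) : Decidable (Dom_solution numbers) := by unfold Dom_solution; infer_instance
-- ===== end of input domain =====

-- B replaces A's try-the-3/4/5-slice dict scan by a two-character-prefix dispatch table and a
-- final join of the collected digits: an alternative algorithm of the same cost.

-- ===== PORT A =====
-- the dict literal 'dic' of A (string keys as their character lists)
def pvDicA : PySem.Dict (List Char) Int :=
  PySem.Dict.ofList [(['z','e','r','o'], 0), (['o','n','e'], 1), (['t','w','o'], 2), (['t','h','r','e','e'], 3),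
    (['f','o','u','r'], 4), (['f','i','v','e'], 5), (['s','i','x'], 6), (['s','e','v','e','n'], 7),
    (['e','i','g','h','t'], 8), (['n','i','n','e'], 9)]

-- A's while loop over index i, rendered as structural recursion on the remaining suffix
-- (numbers[i:i+k] = rest.take k, i += k = rest.drop k);
-- 'some ans' = the loop finished, 'none' = the early 'return 0'
def solutionLoopA (rest : List Char) (ans : List Char) : Option (List Char) :=
  match rest with
  | [] => some ans
  | c :: t =>
    match pvDicA.get? ((c :: t).take 3) with
    | some v => solutionLoopA ((c :: t).drop 3) (ans ++ PySem.Int.toChars v)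
    | none =>
      match pvDicA.get? ((c :: t).take 4) with
      | some v => solutionLoopA ((c :: t).drop 4) (ans ++ PySem.Int.toChars v)
      | none =>
        match pvDicA.get? ((c :: t).take 5) with
        | some v => solutionLoopA ((c :: t).drop 5) (ans ++ PySem.Int.toChars v)
        | none => none
termination_by rest.length
decreasing_by all_goals (simp; try omega)

-- int(ans) raises ValueError only when the loop ran zero times (empty input), which Pre_ excludes
def solution (numbers : String) : Int :=
  match solutionLoopA numbers.toList [] with
  | some ans => (PySem.Int.ofChars? ans).getD 0
  | none => 0

-- ===== PORT B =====
-- the dict literal 'table' of B: two-char prefix ↦ (word, digit)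
def pvTableB : PySem.Dict (List Char) (List Char × List Char) :=
  PySem.Dict.ofList [(['z','e'], (['z','e','r','o'], ['0'])), (['o','n'], (['o','n','e'], ['1'])),
    (['t','w'], (['t','w','o'], ['2'])), (['t','h'], (['t','h','r','e','e'], ['3'])),
    (['f','o'], (['f','o','u','r'], ['4'])), (['f','i'], (['f','i','v','e'], ['5'])),
    (['s','i'], (['s','i','x'], ['6'])), (['s','e'], (['s','e','v','e','n'], ['7'])),
    (['e','i'], (['e','i','g','h','t'], ['8'])), (['n','i'], (['n','i','n','e'], ['9']))]

-- B's while loop; the fuel only makes the recursion total (each step consumes at least one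
-- character, so with initial fuel = length of the string it never runs out)
def solutionLoopB (fuel : Nat) (rest : List Char) (digits : List (List Char)) :
    Option (List (List Char)) :=
  match fuel with
  | 0 => match rest with | [] => some digits | _ => none
  | f + 1 =>
    match rest with
    | [] => some digits
    | _ :: _ =>
      match pvTableB.get? (rest.take 2) with
      | none => none
      | some (word, digit) =>
        if rest.take word.length == word then
          solutionLoopB f (rest.drop word.length) (digits ++ [digit])
        else none

def solution_alt (numbers : String) : Int :=
  match solutionLoopB numbers.toList.length numbers.toList [] with
  | some ds => (PySem.Int.ofChars? (PySem.Chars.join [] ds)).getD 0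
  | none => 0

-- ===== PRECONDITION & SPEC =====
-- Pre_ excludes only the empty string, on which A raises ValueError (and B raises it too)
def Pre_solution (numbers : String) : Prop := numbers ≠ ""
instance (numbers : String) : Decidable (Pre_solution numbers) := by unfold Pre_solution; infer_instance
def pvWitness_solution : String := ("onetwo")

def Spec_solution (numbers : String) (out : Int) : Prop := out = solution_alt numbers
instance (numbers : String) (out : Int) : Decidable (Spec_solution numbers out) := by unfold Spec_solution; infer_instance

-- ===== CLAIM (what is proved, stated in full; the proofs are below) =====
def Claim_equal_solution : Prop := ∀ (numbers : String), Dom_solution numbers → Pre_solution numbers → Spec_solution numbers (solution numbers)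

-- ===== LEMMAS AND PROOFS =====

lemma pvGet_mk_nil {κ ν : Type} [BEq κ] (x : κ) : (PySem.Dict.mk ([] : List (κ × ν))).get? x = none := rfl

lemma pvDicA_mk : pvDicA = PySem.Dict.mk [(['z','e','r','o'], 0), (['o','n','e'], 1), (['t','w','o'], 2), (['t','h','r','e','e'], 3),
    (['f','o','u','r'], 4), (['f','i','v','e'], 5), (['s','i','x'], 6), (['s','e','v','e','n'], 7),
    (['e','i','g','h','t'], 8), (['n','i','n','e'], 9)] := rfl

lemma pvTableB_mk : pvTableB = PySem.Dict.mk [(['z','e'], (['z','e','r','o'], ['0'])), (['o','n'], (['o','n','e'], ['1'])),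
    (['t','w'], (['t','w','o'], ['2'])), (['t','h'], (['t','h','r','e','e'], ['3'])),
    (['f','o'], (['f','o','u','r'], ['4'])), (['f','i'], (['f','i','v','e'], ['5'])),
    (['s','i'], (['s','i','x'], ['6'])), (['s','e'], (['s','e','v','e','n'], ['7'])),
    (['e','i'], (['e','i','g','h','t'], ['8'])), (['n','i'], (['n','i','n','e'], ['9']))] := rfl

lemma pvJoin_flatten (ds : List (List Char)) : PySem.Chars.join [] ds = ds.flatten := by
  induction ds with
  | nil => rfl
  | cons a l ih =>
    cases l with
    | nil => simp [PySem.Chars.join_singleton]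
    | cons b m => simp [PySem.Chars.join_cons_cons] at *; simp [ih]

lemma pvJoin_snoc (ds : List (List Char)) (d : List Char) :
    PySem.Chars.join [] (ds ++ [d]) = PySem.Chars.join [] ds ++ d := by
  simp [pvJoin_flatten]

lemma pvNe_take_of_lt {s t : List Char} {k : Nat} (hk : k < s.length) : s ≠ t.take k := by
  intro h
  have := congrArg List.length h
  simp at this
  omega

lemma pvTake_eq {s t : List Char} {j k : Nat} (hj : j = s.length) (hjk : j ≤ k)
    (h : s = t.take k) : t.take j = s := by
  subst hj
  have h1 : t.take s.length = (t.take k).take s.length := by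
    rw [List.take_take, Nat.min_eq_left hjk]
  rw [h1, ← h, List.take_length]

set_option maxHeartbeats 2000000 in
lemma pvGet_tableB_some (x : List Char) (w dg : List Char)
    (h : pvTableB.get? x = some (w, dg)) :
    (x = ['z','e'] ∧ w = ['z','e','r','o'] ∧ dg = ['0']) ∨
    (x = ['o','n'] ∧ w = ['o','n','e'] ∧ dg = ['1']) ∨
    (x = ['t','w'] ∧ w = ['t','w','o'] ∧ dg = ['2']) ∨
    (x = ['t','h'] ∧ w = ['t','h','r','e','e'] ∧ dg = ['3']) ∨
    (x = ['f','o'] ∧ w = ['f','o','u','r'] ∧ dg = ['4']) ∨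
    (x = ['f','i'] ∧ w = ['f','i','v','e'] ∧ dg = ['5']) ∨
    (x = ['s','i'] ∧ w = ['s','i','x'] ∧ dg = ['6']) ∨
    (x = ['s','e'] ∧ w = ['s','e','v','e','n'] ∧ dg = ['7']) ∨
    (x = ['e','i'] ∧ w = ['e','i','g','h','t'] ∧ dg = ['8']) ∨
    (x = ['n','i'] ∧ w = ['n','i','n','e'] ∧ dg = ['9']) := by
  simp only [pvTableB_mk, PySem.Dict.get?_mk_cons, pvGet_mk_nil] at h
  split_ifs at h <;> simp_all

-- if the 2-char dispatch of B finds no key, every one of A's three lookups fails too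
set_option maxHeartbeats 2000000 in
lemma pvDispatch_none (c c2 : Char) (t2 : List Char) (ans : List Char)
    (h : pvTableB.get? [c, c2] = none) :
    solutionLoopA (c :: c2 :: t2) ans = none := by
  have hze : ¬('z' = c ∧ 'e' = c2) := by
    rintro ⟨rfl, rfl⟩
    simp [pvTableB_mk, PySem.Dict.get?_mk_cons] at h
  have hon : ¬('o' = c ∧ 'n' = c2) := by
    rintro ⟨rfl, rfl⟩
    simp [pvTableB_mk, PySem.Dict.get?_mk_cons] at h
  have htw : ¬('t' = c ∧ 'w' = c2) := by
    rintro ⟨rfl, rfl⟩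
    simp [pvTableB_mk, PySem.Dict.get?_mk_cons] at h
  have hth : ¬('t' = c ∧ 'h' = c2) := by
    rintro ⟨rfl, rfl⟩
    simp [pvTableB_mk, PySem.Dict.get?_mk_cons] at h
  have hfo : ¬('f' = c ∧ 'o' = c2) := by
    rintro ⟨rfl, rfl⟩
    simp [pvTableB_mk, PySem.Dict.get?_mk_cons] at h
  have hfi : ¬('f' = c ∧ 'i' = c2) := by
    rintro ⟨rfl, rfl⟩
    simp [pvTableB_mk, PySem.Dict.get?_mk_cons] at h
  have hsi : ¬('s' = c ∧ 'i' = c2) := by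
    rintro ⟨rfl, rfl⟩
    simp [pvTableB_mk, PySem.Dict.get?_mk_cons] at h
  have hse : ¬('s' = c ∧ 'e' = c2) := by
    rintro ⟨rfl, rfl⟩
    simp [pvTableB_mk, PySem.Dict.get?_mk_cons] at h
  have hei : ¬('e' = c ∧ 'i' = c2) := by
    rintro ⟨rfl, rfl⟩
    simp [pvTableB_mk, PySem.Dict.get?_mk_cons] at h
  have hni : ¬('n' = c ∧ 'i' = c2) := by
    rintro ⟨rfl, rfl⟩
    simp [pvTableB_mk, PySem.Dict.get?_mk_cons] at h
  have a3 : pvDicA.get? (c :: c2 :: List.take 1 t2) = none := by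
    simp only [pvDicA_mk, PySem.Dict.get?_mk_cons,
      pvGet_mk_nil, beq_iff_eq, List.cons.injEq]
    rw [if_neg (fun hc => hze ⟨hc.1, hc.2.1⟩),
      if_neg (fun hc => hon ⟨hc.1, hc.2.1⟩),
      if_neg (fun hc => htw ⟨hc.1, hc.2.1⟩),
      if_neg (fun hc => hth ⟨hc.1, hc.2.1⟩),
      if_neg (fun hc => hfo ⟨hc.1, hc.2.1⟩),
      if_neg (fun hc => hfi ⟨hc.1, hc.2.1⟩),
      if_neg (fun hc => hsi ⟨hc.1, hc.2.1⟩),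
      if_neg (fun hc => hse ⟨hc.1, hc.2.1⟩),
      if_neg (fun hc => hei ⟨hc.1, hc.2.1⟩),
      if_neg (fun hc => hni ⟨hc.1, hc.2.1⟩)]
  have a4 : pvDicA.get? (c :: c2 :: List.take 2 t2) = none := by
    simp only [pvDicA_mk, PySem.Dict.get?_mk_cons,
      pvGet_mk_nil, beq_iff_eq, List.cons.injEq]
    rw [if_neg (fun hc => hze ⟨hc.1, hc.2.1⟩),
      if_neg (fun hc => hon ⟨hc.1, hc.2.1⟩),
      if_neg (fun hc => htw ⟨hc.1, hc.2.1⟩),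
      if_neg (fun hc => hth ⟨hc.1, hc.2.1⟩),
      if_neg (fun hc => hfo ⟨hc.1, hc.2.1⟩),
      if_neg (fun hc => hfi ⟨hc.1, hc.2.1⟩),
      if_neg (fun hc => hsi ⟨hc.1, hc.2.1⟩),
      if_neg (fun hc => hse ⟨hc.1, hc.2.1⟩),
      if_neg (fun hc => hei ⟨hc.1, hc.2.1⟩),
      if_neg (fun hc => hni ⟨hc.1, hc.2.1⟩)]
  have a5 : pvDicA.get? (c :: c2 :: List.take 3 t2) = none := by
    simp only [pvDicA_mk, PySem.Dict.get?_mk_cons,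
      pvGet_mk_nil, beq_iff_eq, List.cons.injEq]
    rw [if_neg (fun hc => hze ⟨hc.1, hc.2.1⟩),
      if_neg (fun hc => hon ⟨hc.1, hc.2.1⟩),
      if_neg (fun hc => htw ⟨hc.1, hc.2.1⟩),
      if_neg (fun hc => hth ⟨hc.1, hc.2.1⟩),
      if_neg (fun hc => hfo ⟨hc.1, hc.2.1⟩),
      if_neg (fun hc => hfi ⟨hc.1, hc.2.1⟩),
      if_neg (fun hc => hsi ⟨hc.1, hc.2.1⟩),
      if_neg (fun hc => hse ⟨hc.1, hc.2.1⟩),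
      if_neg (fun hc => hei ⟨hc.1, hc.2.1⟩),
      if_neg (fun hc => hni ⟨hc.1, hc.2.1⟩)]
  rw [solutionLoopA]
  simp [a3, a4, a5]

set_option maxHeartbeats 2000000 in
lemma pvStep_ze (f : Nat) (t2 : List Char) (hlen : t2.length + 2 ≤ f + 1)
    (ih : ∀ rest, rest.length ≤ f → ∀ ds, solutionLoopA rest (PySem.Chars.join [] ds) = (solutionLoopB f rest ds).map (PySem.Chars.join []))
    (ds : List (List Char)) :
    solutionLoopA ('z' :: 'e' :: t2) (PySem.Chars.join [] ds)
      = (solutionLoopB (f + 1) ('z' :: 'e' :: t2) ds).map (PySem.Chars.join []) := by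
  by_cases hw : t2.take 2 = ['r', 'o']
  · have ht : t2 = 'r' :: 'o' :: t2.drop 2 := by
      conv_lhs => rw [← List.take_append_drop 2 t2]
      rw [hw]; rfl
    rw [ht]
    have hrec := ih (t2.drop 2) (by simp; omega) (ds ++ [['0']])
    rw [pvJoin_snoc] at hrec
    rw [solutionLoopA, solutionLoopB]
    simp [pvDicA_mk, pvTableB_mk, PySem.Dict.get?_mk_cons, pvGet_mk_nil,
      show PySem.Int.toChars 0 = ['0'] from rfl]
    exact hrec
  · rw [solutionLoopA, solutionLoopB]
    simp [pvDicA_mk, pvTableB_mk, PySem.Dict.get?_mk_cons, pvGet_mk_nil, hw]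
    split_ifs <;>
      first
      | rfl
      | exact absurd (show ['r', 'o'] = t2.take 1 from by assumption) (pvNe_take_of_lt (by decide))
      | exact absurd ((show t2.take 1 = ['r', 'o'] from by assumption).symm) (pvNe_take_of_lt (by decide))
      | exact absurd (show t2.take 2 = ['r', 'o'] from by assumption) hw
      | exact absurd ((show ['r', 'o'] = t2.take 2 from by assumption).symm) hw
      | exact absurd (pvTake_eq rfl (by decide) (show ['r', 'o'] = t2.take 3 from by assumption)) hw
      | exact absurd (pvTake_eq rfl (by decide) ((show t2.take 3 = ['r', 'o'] from by assumption).symm)) hw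

set_option maxHeartbeats 2000000 in
lemma pvStep_on (f : Nat) (t2 : List Char) (hlen : t2.length + 2 ≤ f + 1)
    (ih : ∀ rest, rest.length ≤ f → ∀ ds, solutionLoopA rest (PySem.Chars.join [] ds) = (solutionLoopB f rest ds).map (PySem.Chars.join []))
    (ds : List (List Char)) :
    solutionLoopA ('o' :: 'n' :: t2) (PySem.Chars.join [] ds)
      = (solutionLoopB (f + 1) ('o' :: 'n' :: t2) ds).map (PySem.Chars.join []) := by
  by_cases hw : t2.take 1 = ['e']
  · have ht : t2 = 'e' :: t2.drop 1 := by
      conv_lhs => rw [← List.take_append_drop 1 t2]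
      rw [hw]; rfl
    rw [ht]
    have hrec := ih (t2.drop 1) (by simp; omega) (ds ++ [['1']])
    rw [pvJoin_snoc] at hrec
    simp only [List.drop_one] at hrec
    rw [solutionLoopA, solutionLoopB]
    simp [pvDicA_mk, pvTableB_mk, PySem.Dict.get?_mk_cons, pvGet_mk_nil,
      show PySem.Int.toChars 1 = ['1'] from rfl]
    exact hrec
  · rw [solutionLoopA, solutionLoopB]
    simp [pvDicA_mk, pvTableB_mk, PySem.Dict.get?_mk_cons, pvGet_mk_nil, hw]
    split_ifs <;>
      first
      | rfl
      | exact absurd (show t2.take 1 = ['e'] from by assumption) hw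
      | exact absurd ((show ['e'] = t2.take 1 from by assumption).symm) hw
      | exact absurd (pvTake_eq rfl (by decide) (show ['e'] = t2.take 2 from by assumption)) hw
      | exact absurd (pvTake_eq rfl (by decide) ((show t2.take 2 = ['e'] from by assumption).symm)) hw
      | exact absurd (pvTake_eq rfl (by decide) (show ['e'] = t2.take 3 from by assumption)) hw
      | exact absurd (pvTake_eq rfl (by decide) ((show t2.take 3 = ['e'] from by assumption).symm)) hw

set_option maxHeartbeats 2000000 in
lemma pvStep_tw (f : Nat) (t2 : List Char) (hlen : t2.length + 2 ≤ f + 1)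
    (ih : ∀ rest, rest.length ≤ f → ∀ ds, solutionLoopA rest (PySem.Chars.join [] ds) = (solutionLoopB f rest ds).map (PySem.Chars.join []))
    (ds : List (List Char)) :
    solutionLoopA ('t' :: 'w' :: t2) (PySem.Chars.join [] ds)
      = (solutionLoopB (f + 1) ('t' :: 'w' :: t2) ds).map (PySem.Chars.join []) := by
  by_cases hw : t2.take 1 = ['o']
  · have ht : t2 = 'o' :: t2.drop 1 := by
      conv_lhs => rw [← List.take_append_drop 1 t2]
      rw [hw]; rfl
    rw [ht]
    have hrec := ih (t2.drop 1) (by simp; omega) (ds ++ [['2']])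
    rw [pvJoin_snoc] at hrec
    simp only [List.drop_one] at hrec
    rw [solutionLoopA, solutionLoopB]
    simp [pvDicA_mk, pvTableB_mk, PySem.Dict.get?_mk_cons, pvGet_mk_nil,
      show PySem.Int.toChars 2 = ['2'] from rfl]
    exact hrec
  · rw [solutionLoopA, solutionLoopB]
    simp [pvDicA_mk, pvTableB_mk, PySem.Dict.get?_mk_cons, pvGet_mk_nil, hw]
    split_ifs <;>
      first
      | rfl
      | exact absurd (show t2.take 1 = ['o'] from by assumption) hw
      | exact absurd ((show ['o'] = t2.take 1 from by assumption).symm) hw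
      | exact absurd (pvTake_eq rfl (by decide) (show ['o'] = t2.take 2 from by assumption)) hw
      | exact absurd (pvTake_eq rfl (by decide) ((show t2.take 2 = ['o'] from by assumption).symm)) hw
      | exact absurd (pvTake_eq rfl (by decide) (show ['o'] = t2.take 3 from by assumption)) hw
      | exact absurd (pvTake_eq rfl (by decide) ((show t2.take 3 = ['o'] from by assumption).symm)) hw

set_option maxHeartbeats 2000000 in
lemma pvStep_th (f : Nat) (t2 : List Char) (hlen : t2.length + 2 ≤ f + 1)
    (ih : ∀ rest, rest.length ≤ f → ∀ ds, solutionLoopA rest (PySem.Chars.join [] ds) = (solutionLoopB f rest ds).map (PySem.Chars.join []))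
    (ds : List (List Char)) :
    solutionLoopA ('t' :: 'h' :: t2) (PySem.Chars.join [] ds)
      = (solutionLoopB (f + 1) ('t' :: 'h' :: t2) ds).map (PySem.Chars.join []) := by
  by_cases hw : t2.take 3 = ['r', 'e', 'e']
  · have ht : t2 = 'r' :: 'e' :: 'e' :: t2.drop 3 := by
      conv_lhs => rw [← List.take_append_drop 3 t2]
      rw [hw]; rfl
    rw [ht]
    have hrec := ih (t2.drop 3) (by simp; omega) (ds ++ [['3']])
    rw [pvJoin_snoc] at hrec
    rw [solutionLoopA, solutionLoopB]
    simp [pvDicA_mk, pvTableB_mk, PySem.Dict.get?_mk_cons, pvGet_mk_nil,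
      show PySem.Int.toChars 3 = ['3'] from rfl]
    exact hrec
  · rw [solutionLoopA, solutionLoopB]
    simp [pvDicA_mk, pvTableB_mk, PySem.Dict.get?_mk_cons, pvGet_mk_nil, hw]
    split_ifs <;>
      first
      | rfl
      | exact absurd (show ['r', 'e', 'e'] = t2.take 1 from by assumption) (pvNe_take_of_lt (by decide))
      | exact absurd ((show t2.take 1 = ['r', 'e', 'e'] from by assumption).symm) (pvNe_take_of_lt (by decide))
      | exact absurd (show ['r', 'e', 'e'] = t2.take 2 from by assumption) (pvNe_take_of_lt (by decide))
      | exact absurd ((show t2.take 2 = ['r', 'e', 'e'] from by assumption).symm) (pvNe_take_of_lt (by decide))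
      | exact absurd (show t2.take 3 = ['r', 'e', 'e'] from by assumption) hw
      | exact absurd ((show ['r', 'e', 'e'] = t2.take 3 from by assumption).symm) hw

set_option maxHeartbeats 2000000 in
lemma pvStep_fo (f : Nat) (t2 : List Char) (hlen : t2.length + 2 ≤ f + 1)
    (ih : ∀ rest, rest.length ≤ f → ∀ ds, solutionLoopA rest (PySem.Chars.join [] ds) = (solutionLoopB f rest ds).map (PySem.Chars.join []))
    (ds : List (List Char)) :
    solutionLoopA ('f' :: 'o' :: t2) (PySem.Chars.join [] ds)
      = (solutionLoopB (f + 1) ('f' :: 'o' :: t2) ds).map (PySem.Chars.join []) := by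
  by_cases hw : t2.take 2 = ['u', 'r']
  · have ht : t2 = 'u' :: 'r' :: t2.drop 2 := by
      conv_lhs => rw [← List.take_append_drop 2 t2]
      rw [hw]; rfl
    rw [ht]
    have hrec := ih (t2.drop 2) (by simp; omega) (ds ++ [['4']])
    rw [pvJoin_snoc] at hrec
    rw [solutionLoopA, solutionLoopB]
    simp [pvDicA_mk, pvTableB_mk, PySem.Dict.get?_mk_cons, pvGet_mk_nil,
      show PySem.Int.toChars 4 = ['4'] from rfl]
    exact hrec
  · rw [solutionLoopA, solutionLoopB]
    simp [pvDicA_mk, pvTableB_mk, PySem.Dict.get?_mk_cons, pvGet_mk_nil, hw]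
    split_ifs <;>
      first
      | rfl
      | exact absurd (show ['u', 'r'] = t2.take 1 from by assumption) (pvNe_take_of_lt (by decide))
      | exact absurd ((show t2.take 1 = ['u', 'r'] from by assumption).symm) (pvNe_take_of_lt (by decide))
      | exact absurd (show t2.take 2 = ['u', 'r'] from by assumption) hw
      | exact absurd ((show ['u', 'r'] = t2.take 2 from by assumption).symm) hw
      | exact absurd (pvTake_eq rfl (by decide) (show ['u', 'r'] = t2.take 3 from by assumption)) hw
      | exact absurd (pvTake_eq rfl (by decide) ((show t2.take 3 = ['u', 'r'] from by assumption).symm)) hw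

set_option maxHeartbeats 2000000 in
lemma pvStep_fi (f : Nat) (t2 : List Char) (hlen : t2.length + 2 ≤ f + 1)
    (ih : ∀ rest, rest.length ≤ f → ∀ ds, solutionLoopA rest (PySem.Chars.join [] ds) = (solutionLoopB f rest ds).map (PySem.Chars.join []))
    (ds : List (List Char)) :
    solutionLoopA ('f' :: 'i' :: t2) (PySem.Chars.join [] ds)
      = (solutionLoopB (f + 1) ('f' :: 'i' :: t2) ds).map (PySem.Chars.join []) := by
  by_cases hw : t2.take 2 = ['v', 'e']
  · have ht : t2 = 'v' :: 'e' :: t2.drop 2 := by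
      conv_lhs => rw [← List.take_append_drop 2 t2]
      rw [hw]; rfl
    rw [ht]
    have hrec := ih (t2.drop 2) (by simp; omega) (ds ++ [['5']])
    rw [pvJoin_snoc] at hrec
    rw [solutionLoopA, solutionLoopB]
    simp [pvDicA_mk, pvTableB_mk, PySem.Dict.get?_mk_cons, pvGet_mk_nil,
      show PySem.Int.toChars 5 = ['5'] from rfl]
    exact hrec
  · rw [solutionLoopA, solutionLoopB]
    simp [pvDicA_mk, pvTableB_mk, PySem.Dict.get?_mk_cons, pvGet_mk_nil, hw]
    split_ifs <;>
      first
      | rfl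
      | exact absurd (show ['v', 'e'] = t2.take 1 from by assumption) (pvNe_take_of_lt (by decide))
      | exact absurd ((show t2.take 1 = ['v', 'e'] from by assumption).symm) (pvNe_take_of_lt (by decide))
      | exact absurd (show t2.take 2 = ['v', 'e'] from by assumption) hw
      | exact absurd ((show ['v', 'e'] = t2.take 2 from by assumption).symm) hw
      | exact absurd (pvTake_eq rfl (by decide) (show ['v', 'e'] = t2.take 3 from by assumption)) hw
      | exact absurd (pvTake_eq rfl (by decide) ((show t2.take 3 = ['v', 'e'] from by assumption).symm)) hw

set_option maxHeartbeats 2000000 in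
lemma pvStep_si (f : Nat) (t2 : List Char) (hlen : t2.length + 2 ≤ f + 1)
    (ih : ∀ rest, rest.length ≤ f → ∀ ds, solutionLoopA rest (PySem.Chars.join [] ds) = (solutionLoopB f rest ds).map (PySem.Chars.join []))
    (ds : List (List Char)) :
    solutionLoopA ('s' :: 'i' :: t2) (PySem.Chars.join [] ds)
      = (solutionLoopB (f + 1) ('s' :: 'i' :: t2) ds).map (PySem.Chars.join []) := by
  by_cases hw : t2.take 1 = ['x']
  · have ht : t2 = 'x' :: t2.drop 1 := by
      conv_lhs => rw [← List.take_append_drop 1 t2]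
      rw [hw]; rfl
    rw [ht]
    have hrec := ih (t2.drop 1) (by simp; omega) (ds ++ [['6']])
    rw [pvJoin_snoc] at hrec
    simp only [List.drop_one] at hrec
    rw [solutionLoopA, solutionLoopB]
    simp [pvDicA_mk, pvTableB_mk, PySem.Dict.get?_mk_cons, pvGet_mk_nil,
      show PySem.Int.toChars 6 = ['6'] from rfl]
    exact hrec
  · rw [solutionLoopA, solutionLoopB]
    simp [pvDicA_mk, pvTableB_mk, PySem.Dict.get?_mk_cons, pvGet_mk_nil, hw]
    split_ifs <;>
      first
      | rfl
      | exact absurd (show t2.take 1 = ['x'] from by assumption) hw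
      | exact absurd ((show ['x'] = t2.take 1 from by assumption).symm) hw
      | exact absurd (pvTake_eq rfl (by decide) (show ['x'] = t2.take 2 from by assumption)) hw
      | exact absurd (pvTake_eq rfl (by decide) ((show t2.take 2 = ['x'] from by assumption).symm)) hw
      | exact absurd (pvTake_eq rfl (by decide) (show ['x'] = t2.take 3 from by assumption)) hw
      | exact absurd (pvTake_eq rfl (by decide) ((show t2.take 3 = ['x'] from by assumption).symm)) hw

set_option maxHeartbeats 2000000 in
lemma pvStep_se (f : Nat) (t2 : List Char) (hlen : t2.length + 2 ≤ f + 1)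
    (ih : ∀ rest, rest.length ≤ f → ∀ ds, solutionLoopA rest (PySem.Chars.join [] ds) = (solutionLoopB f rest ds).map (PySem.Chars.join []))
    (ds : List (List Char)) :
    solutionLoopA ('s' :: 'e' :: t2) (PySem.Chars.join [] ds)
      = (solutionLoopB (f + 1) ('s' :: 'e' :: t2) ds).map (PySem.Chars.join []) := by
  by_cases hw : t2.take 3 = ['v', 'e', 'n']
  · have ht : t2 = 'v' :: 'e' :: 'n' :: t2.drop 3 := by
      conv_lhs => rw [← List.take_append_drop 3 t2]
      rw [hw]; rfl
    rw [ht]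
    have hrec := ih (t2.drop 3) (by simp; omega) (ds ++ [['7']])
    rw [pvJoin_snoc] at hrec
    rw [solutionLoopA, solutionLoopB]
    simp [pvDicA_mk, pvTableB_mk, PySem.Dict.get?_mk_cons, pvGet_mk_nil,
      show PySem.Int.toChars 7 = ['7'] from rfl]
    exact hrec
  · rw [solutionLoopA, solutionLoopB]
    simp [pvDicA_mk, pvTableB_mk, PySem.Dict.get?_mk_cons, pvGet_mk_nil, hw]
    split_ifs <;>
      first
      | rfl
      | exact absurd (show ['v', 'e', 'n'] = t2.take 1 from by assumption) (pvNe_take_of_lt (by decide))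
      | exact absurd ((show t2.take 1 = ['v', 'e', 'n'] from by assumption).symm) (pvNe_take_of_lt (by decide))
      | exact absurd (show ['v', 'e', 'n'] = t2.take 2 from by assumption) (pvNe_take_of_lt (by decide))
      | exact absurd ((show t2.take 2 = ['v', 'e', 'n'] from by assumption).symm) (pvNe_take_of_lt (by decide))
      | exact absurd (show t2.take 3 = ['v', 'e', 'n'] from by assumption) hw
      | exact absurd ((show ['v', 'e', 'n'] = t2.take 3 from by assumption).symm) hw

set_option maxHeartbeats 2000000 in
lemma pvStep_ei (f : Nat) (t2 : List Char) (hlen : t2.length + 2 ≤ f + 1)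
    (ih : ∀ rest, rest.length ≤ f → ∀ ds, solutionLoopA rest (PySem.Chars.join [] ds) = (solutionLoopB f rest ds).map (PySem.Chars.join []))
    (ds : List (List Char)) :
    solutionLoopA ('e' :: 'i' :: t2) (PySem.Chars.join [] ds)
      = (solutionLoopB (f + 1) ('e' :: 'i' :: t2) ds).map (PySem.Chars.join []) := by
  by_cases hw : t2.take 3 = ['g', 'h', 't']
  · have ht : t2 = 'g' :: 'h' :: 't' :: t2.drop 3 := by
      conv_lhs => rw [← List.take_append_drop 3 t2]
      rw [hw]; rfl
    rw [ht]
    have hrec := ih (t2.drop 3) (by simp; omega) (ds ++ [['8']])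
    rw [pvJoin_snoc] at hrec
    rw [solutionLoopA, solutionLoopB]
    simp [pvDicA_mk, pvTableB_mk, PySem.Dict.get?_mk_cons, pvGet_mk_nil,
      show PySem.Int.toChars 8 = ['8'] from rfl]
    exact hrec
  · rw [solutionLoopA, solutionLoopB]
    simp [pvDicA_mk, pvTableB_mk, PySem.Dict.get?_mk_cons, pvGet_mk_nil, hw]
    split_ifs <;>
      first
      | rfl
      | exact absurd (show ['g', 'h', 't'] = t2.take 1 from by assumption) (pvNe_take_of_lt (by decide))
      | exact absurd ((show t2.take 1 = ['g', 'h', 't'] from by assumption).symm) (pvNe_take_of_lt (by decide))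
      | exact absurd (show ['g', 'h', 't'] = t2.take 2 from by assumption) (pvNe_take_of_lt (by decide))
      | exact absurd ((show t2.take 2 = ['g', 'h', 't'] from by assumption).symm) (pvNe_take_of_lt (by decide))
      | exact absurd (show t2.take 3 = ['g', 'h', 't'] from by assumption) hw
      | exact absurd ((show ['g', 'h', 't'] = t2.take 3 from by assumption).symm) hw

set_option maxHeartbeats 2000000 in
lemma pvStep_ni (f : Nat) (t2 : List Char) (hlen : t2.length + 2 ≤ f + 1)
    (ih : ∀ rest, rest.length ≤ f → ∀ ds, solutionLoopA rest (PySem.Chars.join [] ds) = (solutionLoopB f rest ds).map (PySem.Chars.join []))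
    (ds : List (List Char)) :
    solutionLoopA ('n' :: 'i' :: t2) (PySem.Chars.join [] ds)
      = (solutionLoopB (f + 1) ('n' :: 'i' :: t2) ds).map (PySem.Chars.join []) := by
  by_cases hw : t2.take 2 = ['n', 'e']
  · have ht : t2 = 'n' :: 'e' :: t2.drop 2 := by
      conv_lhs => rw [← List.take_append_drop 2 t2]
      rw [hw]; rfl
    rw [ht]
    have hrec := ih (t2.drop 2) (by simp; omega) (ds ++ [['9']])
    rw [pvJoin_snoc] at hrec
    rw [solutionLoopA, solutionLoopB]
    simp [pvDicA_mk, pvTableB_mk, PySem.Dict.get?_mk_cons, pvGet_mk_nil,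
      show PySem.Int.toChars 9 = ['9'] from rfl]
    exact hrec
  · rw [solutionLoopA, solutionLoopB]
    simp [pvDicA_mk, pvTableB_mk, PySem.Dict.get?_mk_cons, pvGet_mk_nil, hw]
    split_ifs <;>
      first
      | rfl
      | exact absurd (show ['n', 'e'] = t2.take 1 from by assumption) (pvNe_take_of_lt (by decide))
      | exact absurd ((show t2.take 1 = ['n', 'e'] from by assumption).symm) (pvNe_take_of_lt (by decide))
      | exact absurd (show t2.take 2 = ['n', 'e'] from by assumption) hw
      | exact absurd ((show ['n', 'e'] = t2.take 2 from by assumption).symm) hw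
      | exact absurd (pvTake_eq rfl (by decide) (show ['n', 'e'] = t2.take 3 from by assumption)) hw
      | exact absurd (pvTake_eq rfl (by decide) ((show t2.take 3 = ['n', 'e'] from by assumption).symm)) hw

set_option maxHeartbeats 2000000 in
lemma pvLoop_agree : ∀ (fuel : Nat) (rest : List Char) (ds : List (List Char)), rest.length ≤ fuel →
    solutionLoopA rest (PySem.Chars.join [] ds) = (solutionLoopB fuel rest ds).map (PySem.Chars.join []) := by
  intro fuel
  induction fuel with
  | zero =>
    intro rest ds h
    have hr : rest = [] := List.eq_nil_of_length_eq_zero (Nat.le_zero.mp h)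
    subst hr
    rw [solutionLoopA, solutionLoopB]
    rfl
  | succ f ih =>
    intro rest ds h
    cases rest with
    | nil =>
      rw [solutionLoopA, solutionLoopB]
      rfl
    | cons c t =>
      cases t with
      | nil =>
        rw [solutionLoopA, solutionLoopB]
        simp [pvDicA_mk, pvTableB_mk, PySem.Dict.get?_mk_cons, pvGet_mk_nil]
      | cons c2 t2 =>
        rcases hk : pvTableB.get? [c, c2] with _ | ⟨w, dg⟩
        · rw [pvDispatch_none c c2 t2 _ hk, solutionLoopB]
          simp [hk]
        · have hlen2 : t2.length + 2 ≤ f + 1 := by simp at h; omega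
          have ihh : ∀ rest, rest.length ≤ f → ∀ ds, solutionLoopA rest (PySem.Chars.join [] ds) = (solutionLoopB f rest ds).map (PySem.Chars.join []) :=
            fun r hr d => ih r d hr
          rcases pvGet_tableB_some _ _ _ hk with ⟨hx, rfl, rfl⟩ | ⟨hx, rfl, rfl⟩ | ⟨hx, rfl, rfl⟩ | ⟨hx, rfl, rfl⟩ | ⟨hx, rfl, rfl⟩ | ⟨hx, rfl, rfl⟩ | ⟨hx, rfl, rfl⟩ | ⟨hx, rfl, rfl⟩ | ⟨hx, rfl, rfl⟩ | ⟨hx, rfl, rfl⟩ <;>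
            (simp only [List.cons.injEq, and_true] at hx
             obtain ⟨rfl, rfl⟩ := hx)
          · exact pvStep_ze f t2 hlen2 ihh ds
          · exact pvStep_on f t2 hlen2 ihh ds
          · exact pvStep_tw f t2 hlen2 ihh ds
          · exact pvStep_th f t2 hlen2 ihh ds
          · exact pvStep_fo f t2 hlen2 ihh ds
          · exact pvStep_fi f t2 hlen2 ihh ds
          · exact pvStep_si f t2 hlen2 ihh ds
          · exact pvStep_se f t2 hlen2 ihh ds
          · exact pvStep_ei f t2 hlen2 ihh ds
          · exact pvStep_ni f t2 hlen2 ihh ds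

-- ===== VERDICT (by name: the statement is the Claim_ definition above) =====
theorem solution_spec : Claim_equal_solution := by
  unfold Claim_equal_solution
  intro numbers _ _
  unfold Spec_solution solution solution_alt
  have h := pvLoop_agree numbers.toList.length numbers.toList [] (le_refl _)
  rw [show PySem.Chars.join [] [] = [] from rfl] at h
  rw [h]
  cases hB : solutionLoopB numbers.toList.length numbers.toList [] with
  | none => rfl
  | some ds => rfl
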